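-- pv_equiv track=rewrite | github.com/etboudreau/snow_mapping | pp_functions.py | find_last_consecutive_ones_after_zero
-- ===== SOURCE A (Python) =====
-- def find_last_consecutive_ones_after_zero(arr):
--     max_consecutive_indices = []
--     n = len(arr)
--     i = 0
--     while i < n - 1:
--         if arr[i] == 0 and arr[i + 1] == 1:
--             start_index = i + 1
--             while start_index < n - 1 and arr[start_index] == 1 and arr[start_index + 1] == 1:
--                 start_index += 1
--             consecutive_indices = [start_index]
--             if len(consecutive_indices) > len(max_consecutive_indices):
--                 max_consecutive_indices = consecutive_indices
--             i = start_index + 1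
--         else:
--             i += 1
--     return max_consecutive_indices
-- ===== SOURCE B (Python) =====
-- from itertools import groupby
--
-- def find_last_consecutive_ones_after_zero(arr):
--     pos = 0
--     prev = None
--     for v, g in groupby(arr):
--         length = sum(1 for _ in g)
--         if v == 1 and prev == 0:
--             return [pos + length - 1]
--         prev = v
--         pos += length
--     return []
-- ===== Notes on version B (the rewrite author's own statement) =====
-- stated objective: idiomatic
-- what changed: B replaces A's index-based while loop with an inner run-extending while loop (and a vestigial max-length list comparison) by a single pass over itertools.groupby run-lengths, returning the end index of the first 1-run preceded by a 0-run.
import Mathlib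
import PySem

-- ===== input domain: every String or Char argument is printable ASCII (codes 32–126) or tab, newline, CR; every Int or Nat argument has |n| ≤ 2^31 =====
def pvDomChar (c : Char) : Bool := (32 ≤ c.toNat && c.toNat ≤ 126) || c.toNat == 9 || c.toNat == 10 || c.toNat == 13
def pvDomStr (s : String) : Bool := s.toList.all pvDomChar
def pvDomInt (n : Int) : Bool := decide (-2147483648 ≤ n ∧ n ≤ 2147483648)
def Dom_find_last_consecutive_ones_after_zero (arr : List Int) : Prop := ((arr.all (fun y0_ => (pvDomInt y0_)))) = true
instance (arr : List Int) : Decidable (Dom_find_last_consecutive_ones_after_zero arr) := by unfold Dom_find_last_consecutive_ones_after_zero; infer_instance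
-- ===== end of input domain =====

-- B replaces A's scan-then-extend while loops by a single pass over groupby run-lengths; same O(n) cost, plainer shape.

-- ===== PORT A =====
-- inner while loop: extend start_index while the next element continues a run of 1s
-- (fuel-based structural recursion; fuel = n always suffices, the loop index grows each step)
def pvAinner (arr : List Int) (n : Nat) : Nat → Nat → Nat
  | 0, s => s
  | fuel+1, s =>
    if s < n - 1 ∧ arr.getD s 0 = 1 ∧ arr.getD (s+1) 0 = 1 then pvAinner arr n fuel (s+1)
    else s

-- outer while loop of A, carrying max_consecutive_indices (fuel-based, fuel = n suffices)
def pvAouter (arr : List Int) (n : Nat) : Nat → Nat → List Int → List Int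
  | 0, _, maxc => maxc
  | fuel+1, i, maxc =>
    if i < n - 1 then
      if arr.getD i 0 = 0 ∧ arr.getD (i+1) 0 = 1 then
        let s := pvAinner arr n n (i+1)
        let ci : List Int := [(s : Int)]
        pvAouter arr n fuel (s+1) (if ci.length > maxc.length then ci else maxc)
      else pvAouter arr n fuel (i+1) maxc
    else maxc

def find_last_consecutive_ones_after_zero (arr : List Int) : List Int :=
  pvAouter arr arr.length arr.length 0 []

-- ===== PORT B =====
-- run-length encoding of the list, as itertools.groupby produces it (value, group length)
def pvRle (arr : List Int) : List (Int × Nat) :=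
  match arr with
  | [] => []
  | x :: xs =>
    (x, 1 + (xs.takeWhile (fun y => y = x)).length) :: pvRle (xs.dropWhile (fun y => y = x))
termination_by arr.length
decreasing_by
  simp only [List.length_cons]
  exact Nat.lt_succ_of_le (List.length_dropWhile_le _ _)

-- the for loop of B over the groups, carrying pos and prev
def pvBscan (gs : List (Int × Nat)) (pos : Nat) (prev : Option Int) : List Int :=
  match gs with
  | [] => []
  | (v, len) :: rest =>
    if v = 1 ∧ prev = some 0 then [(pos : Int) + (len : Int) - 1]
    else pvBscan rest (pos + len) (some v)

def find_last_consecutive_ones_after_zero_alt (arr : List Int) : List Int :=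
  pvBscan (pvRle arr) 0 none

-- ===== PRECONDITION & SPEC =====
def Spec_find_last_consecutive_ones_after_zero (arr : List Int) (out : List Int) : Prop := out = find_last_consecutive_ones_after_zero_alt arr
instance (arr : List Int) (out : List Int) : Decidable (Spec_find_last_consecutive_ones_after_zero arr out) := by unfold Spec_find_last_consecutive_ones_after_zero; infer_instance

-- ===== CLAIM (what is proved, stated in full; the proofs are below) =====
def Claim_equal_find_last_consecutive_ones_after_zero : Prop := ∀ (arr : List Int), Dom_find_last_consecutive_ones_after_zero arr → Spec_find_last_consecutive_ones_after_zero arr (find_last_consecutive_ones_after_zero arr)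

-- ===== LEMMAS AND PROOFS =====

-- number of leading 1s
def pvLeadOnes (l : List Int) : Nat := (l.takeWhile (fun y => y = 1)).length

-- intermediate scanner: prev value p (at index pos-1), rest of list starting at index pos
def pvH (p : Int) (pos : Nat) (l : List Int) : List Int :=
  match l with
  | [] => []
  | x :: xs => if p = 0 ∧ x = 1 then [(pos : Int) + (pvLeadOnes xs : Int)] else pvH x (pos+1) xs

-- pair scanner matching A's outer loop shape: list starts at index pos
def pvG (pos : Nat) (l : List Int) : List Int :=
  match l with
  | [] => []
  | [_] => []
  | x :: y :: rest =>
    if x = 0 ∧ y = 1 then [(pos : Int) + 1 + (pvLeadOnes rest : Int)]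
    else pvG (pos+1) (y :: rest)

theorem pvDropCons (arr : List Int) (i : Nat) (h : i < arr.length) :
    arr.drop i = arr.getD i 0 :: arr.drop (i+1) := by
  rw [List.getD_eq_getElem?_getD, List.getElem?_eq_getElem h, Option.getD_some]
  exact List.drop_eq_getElem_cons h

theorem pvG_eq_pvH (l : List Int) : ∀ (pos : Nat) (x : Int), pvG pos (x :: l) = pvH x (pos+1) l := by
  induction l with
  | nil => intro pos x; simp [pvG, pvH]
  | cons y ys ih =>
    intro pos x
    simp only [pvG, pvH]
    split
    · rfl
    · exact ih (pos+1) y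

-- skipping a run of equal values inside pvH
theorem pvH_skip_group (x : Int) (l : List Int) : ∀ (q : Nat),
    pvH x q l = pvH x (q + (l.takeWhile (fun y => y = x)).length) (l.dropWhile (fun y => y = x)) := by
  induction l with
  | nil => intro q; simp
  | cons y ys ih =>
    intro q
    by_cases hy : y = x
    · subst hy
      have hcond : ¬ (y = 0 ∧ y = 1) := by rintro ⟨h0, h1⟩; rw [h0] at h1; exact absurd h1 (by decide)
      rw [pvH, if_neg hcond, ih (q+1),
          List.takeWhile_cons_of_pos (by exact decide_eq_true rfl),
          List.dropWhile_cons_of_pos (by exact decide_eq_true rfl), List.length_cons]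
      congr 1
      omega
    · rw [List.takeWhile_cons_of_neg (by simpa using hy),
          List.dropWhile_cons_of_neg (by simpa using hy),
          List.length_nil, Nat.add_zero]

-- B's group scan computes pvH
theorem pvBscan_eq_pvH (l : List Int) : ∀ (pos : Nat) (p : Int),
    pvBscan (pvRle l) pos (some p) = pvH p pos l := by
  induction l using pvRle.induct with
  | case1 => intro pos p; simp [pvRle, pvBscan, pvH]
  | case2 x xs ih =>
    intro pos p
    rw [pvRle]
    simp only [pvBscan]
    by_cases hm : x = 1 ∧ (some p : Option Int) = some 0
    · obtain ⟨hx, hp⟩ := hm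
      have hp' : p = 0 := Option.some.inj hp
      rw [if_pos ⟨hx, hp⟩, pvH, if_pos ⟨hp', hx⟩]
      have hL : pvLeadOnes xs = (xs.takeWhile (fun y => y = x)).length := by
        rw [pvLeadOnes, hx]
      rw [hL]
      congr 1
      push_cast
      ring
    · have hnot : ¬ (p = 0 ∧ x = 1) := by
        rintro ⟨h0, h1⟩; exact hm ⟨h1, by rw [h0]⟩
      rw [if_neg hm, ih]
      conv_rhs => rw [pvH]
      rw [if_neg hnot, pvH_skip_group x xs (pos+1)]
      congr 1
      omega

-- the inner loop's result is at least its starting index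
theorem pvAinner_ge (arr : List Int) (n : Nat) : ∀ (fuel s : Nat), s ≤ pvAinner arr n fuel s := by
  intro fuel
  induction fuel with
  | zero => intro s; exact le_refl s
  | succ fuel ih =>
    intro s
    rw [pvAinner]
    split
    · exact le_trans (Nat.le_succ s) (ih (s+1))
    · exact le_refl s

-- A's inner loop computes the end of the 1-run: index s + leading ones after s
theorem pvAinner_eq (arr : List Int) : ∀ (fuel s : Nat), arr.length - 1 - s ≤ fuel →
    s < arr.length → arr.getD s 0 = 1 →
    pvAinner arr arr.length fuel s = s + pvLeadOnes (arr.drop (s+1)) := by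
  intro fuel
  induction fuel with
  | zero =>
    intro s hf hs h1
    rw [pvAinner, List.drop_eq_nil_of_le (by omega : arr.length ≤ s + 1)]
    rfl
  | succ fuel ih =>
    intro s hf hs h1
    rw [pvAinner]
    by_cases hcond : s < arr.length - 1 ∧ arr.getD s 0 = 1 ∧ arr.getD (s+1) 0 = 1
    · obtain ⟨hlt, _, hnext⟩ := hcond
      rw [if_pos ⟨hlt, h1, hnext⟩, ih (s+1) (by omega) (by omega) hnext,
          pvDropCons arr (s+1) (by omega)]
      have hrw : pvLeadOnes (arr.getD (s+1) 0 :: arr.drop (s+1+1)) = pvLeadOnes (arr.drop (s+1+1)) + 1 := by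
        rw [pvLeadOnes, List.takeWhile_cons_of_pos (by exact decide_eq_true hnext), List.length_cons]
        rfl
      rw [hrw]
      omega
    · rw [if_neg hcond]
      push Not at hcond
      by_cases hlt : s < arr.length - 1
      · have hnext := hcond hlt h1
        rw [pvDropCons arr (s+1) (by omega), pvLeadOnes,
            List.takeWhile_cons_of_neg (by simpa using hnext)]
        rfl
      · rw [List.drop_eq_nil_of_le (by omega : arr.length ≤ s + 1)]
        rfl

-- A's outer loop: with empty accumulator it computes the pair scan pvG on the suffix,
-- and once max_consecutive_indices is nonempty it never changes (the length test 1 > len fails)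
theorem pvAouter_eq (arr : List Int) : ∀ (fuel i : Nat) (maxc : List Int),
    arr.length - 1 - i ≤ fuel →
    pvAouter arr arr.length fuel i maxc = (if maxc = [] then pvG i (arr.drop i) else maxc) := by
  intro fuel
  induction fuel with
  | zero =>
    intro i maxc hf
    rw [pvAouter]
    cases maxc with
    | cons c cs => rw [if_neg (by simp)]
    | nil =>
      rw [if_pos rfl]
      rcases Nat.lt_or_ge i arr.length with hi | hi
      · rw [pvDropCons arr i hi, List.drop_eq_nil_of_le (by omega : arr.length ≤ i + 1), pvG]
      · rw [List.drop_eq_nil_of_le hi, pvG]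
  | succ fuel ih =>
    intro i maxc hf
    rw [pvAouter]
    by_cases h : i < arr.length - 1
    · rw [if_pos h]
      by_cases hc : arr.getD i 0 = 0 ∧ arr.getD (i+1) 0 = 1
      · obtain ⟨h0, h1⟩ := hc
        rw [if_pos ⟨h0, h1⟩]
        simp only []
        have hset : i + 1 ≤ pvAinner arr arr.length arr.length (i+1) := pvAinner_ge arr arr.length arr.length (i+1)
        cases maxc with
        | nil =>
          rw [if_pos (by simp), ih _ _ (by omega), if_neg (by simp), if_pos rfl]
          rw [pvDropCons arr i (by omega), pvDropCons arr (i+1) (by omega), pvG, if_pos ⟨h0, h1⟩,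
              pvAinner_eq arr arr.length (i+1) (by omega) (by omega) h1]
          congr 1
        | cons c cs =>
          rw [if_neg (by simp), ih _ _ (by omega)]
          simp
      · rw [if_neg hc]
        cases maxc with
        | nil =>
          rw [ih _ _ (by omega), if_pos rfl, if_pos rfl]
          conv_rhs => rw [pvDropCons arr i (by omega)]
          conv_rhs => rw [pvDropCons arr (i+1) (by omega)]
          rw [pvG, if_neg hc, ← pvDropCons arr (i+1) (by omega)]
        | cons c cs =>
          rw [ih _ _ (by omega)]
          simp
    · rw [if_neg h]
      cases maxc with
      | cons c cs => rw [if_neg (by simp)]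
      | nil =>
        rw [if_pos rfl]
        rcases Nat.lt_or_ge i arr.length with hi | hi
        · rw [pvDropCons arr i hi, List.drop_eq_nil_of_le (by omega : arr.length ≤ i + 1), pvG]
        · rw [List.drop_eq_nil_of_le hi, pvG]

-- ===== VERDICT (by name: the statement is the Claim_ definition above) =====
theorem find_last_consecutive_ones_after_zero_spec : Claim_equal_find_last_consecutive_ones_after_zero := by
  intro arr _
  unfold Spec_find_last_consecutive_ones_after_zero
  unfold find_last_consecutive_ones_after_zero find_last_consecutive_ones_after_zero_alt
  rw [pvAouter_eq arr arr.length 0 [] (by omega), if_pos rfl, List.drop_zero]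
  cases arr with
  | nil => simp [pvG, pvRle, pvBscan]
  | cons x xs =>
    rw [pvG_eq_pvH, pvRle]
    simp only [pvBscan]
    rw [if_neg (by simp), pvBscan_eq_pvH, pvH_skip_group x xs 1]
    congr 1
    omega
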